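-- pv_equiv track=rewrite | github.com/ErickGon05/proyecto-logica | backend/var_finder.py | var_finder
-- ===== SOURCE A (Python) =====
-- def var_finder(prem_l: list):
--     var_list = []
--
--     for prem in prem_l:
--         i = 0
--         while i < len(prem):
--             c = prem[i]
--
--             if c.isspace():
--                 i += 1
--                 continue
--
--             if c.isalnum() or c == '_':
--                 start = i
--
--                 while i < len(prem) and (prem[i].isalnum() or prem[i] == '_'):
--                     i += 1
--
--                 name = prem[start:i]
--
--                 if name not in var_list:
--                     var_list.append(name)
--
--                 continue
--
--             i += 1
--
--     return var_list
-- ===== SOURCE B (Python) =====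
-- def var_finder(prem_l: list):
--     seen = []
--     for prem in prem_l:
--         cleaned = ''.join(c if (c.isalnum() or c == '_') else ' ' for c in prem)
--         for tok in cleaned.split():
--             if tok not in seen:
--                 seen.append(tok)
--     return seen
-- ===== Notes on version B (the rewrite author's own statement) =====
-- stated objective: idiomatic
-- what changed: A's hand-written index-scanning DFA (outer while over character positions with an inner while advancing past each token) is replaced by mapping every non-word character to a space and using str.split() to produce the tokens, then deduplicating them in first-occurrence order.
import Mathlib
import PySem

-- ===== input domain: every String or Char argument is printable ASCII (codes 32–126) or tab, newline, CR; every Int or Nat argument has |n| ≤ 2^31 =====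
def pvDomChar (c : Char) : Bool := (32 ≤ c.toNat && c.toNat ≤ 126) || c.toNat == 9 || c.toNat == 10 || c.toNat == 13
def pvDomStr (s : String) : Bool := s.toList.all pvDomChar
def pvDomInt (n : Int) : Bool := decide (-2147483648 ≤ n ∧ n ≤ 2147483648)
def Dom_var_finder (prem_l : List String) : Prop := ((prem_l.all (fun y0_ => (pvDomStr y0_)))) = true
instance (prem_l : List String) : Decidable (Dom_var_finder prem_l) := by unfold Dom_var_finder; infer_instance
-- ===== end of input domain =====

-- B replaces A's manual index-scanning tokenizer by mask-non-word-chars-to-space + str.split() (idiomatic); return value only, no mutation.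

-- ===== PORT A =====
-- the token-character test 'c.isalnum() or c == "_"' used by both sources
def pvWord (c : Char) : Bool := PySem.Chars.isalnum c || c == '_'

-- A's inner 'while i < len(prem) and (prem[i].isalnum() or prem[i] == "_"): i += 1'
def pvWordEnd (s : List Char) (i : Nat) : Nat :=
  if h : i < s.length then
    if pvWord s[i] then pvWordEnd s (i + 1) else i
  else i
termination_by s.length - i
decreasing_by omega

theorem pvWordEnd_ge (s : List Char) (i : Nat) : i ≤ pvWordEnd s i := by
  rw [pvWordEnd]
  split
  · split
    · exact Nat.le_trans (Nat.le_succ i) (pvWordEnd_ge s (i + 1))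
    · exact Nat.le_refl i
  · exact Nat.le_refl i
termination_by s.length - i
decreasing_by omega

theorem pvWordEnd_le (s : List Char) (i : Nat) (h : i ≤ s.length) : pvWordEnd s i ≤ s.length := by
  rw [pvWordEnd]
  split
  · split
    · exact pvWordEnd_le s (i + 1) (by omega)
    · exact h
  · exact h
termination_by s.length - i
decreasing_by omega

-- A's outer 'while i < len(prem)' scanning loop, carried accumulator var_list
def pvScanA (s : List Char) (i : Nat) (var_list : List String) : List String :=
  if h : i < s.length then
    let c := s[i]
    if hsp : PySem.Chars.isspace c then pvScanA s (i + 1) var_list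
    else if hw : pvWord c then
      let start := i
      let j := pvWordEnd s i
      let name := String.ofList (PySem.List.slice s (some (start : Int)) (some (j : Int)))
      pvScanA s j (if name ∈ var_list then var_list else var_list ++ [name])
    else pvScanA s (i + 1) var_list
  else var_list
termination_by s.length - i
decreasing_by
  · omega
  · have h1 : i + 1 ≤ pvWordEnd s i := by
      rw [pvWordEnd, dif_pos h, if_pos hw]; exact pvWordEnd_ge s (i + 1)
    have h2 := pvWordEnd_le s i (Nat.le_of_lt h)
    omega
  · omega

def var_finder (prem_l : List String) : List String :=
  prem_l.foldl (fun var_list prem => pvScanA prem.toList 0 var_list) []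

-- ===== PORT B =====
-- B: per premise, map every non-word char to ' ', then str.split() and dedup in order
def var_finder_alt (prem_l : List String) : List String :=
  prem_l.foldl (fun seen prem =>
    let cleaned := prem.toList.map (fun c => if pvWord c then c else ' ')
    (PySem.Chars.split₀ cleaned).foldl
      (fun seen tok => if String.ofList tok ∈ seen then seen else seen ++ [String.ofList tok]) seen) []

-- ===== PRECONDITION & SPEC =====
def Spec_var_finder (prem_l : List String) (out : List String) : Prop := out = var_finder_alt prem_l
instance (prem_l : List String) (out : List String) : Decidable (Spec_var_finder prem_l out) := by unfold Spec_var_finder; infer_instance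

-- ===== CLAIM (what is proved, stated in full; the proofs are below) =====
def Claim_equal_var_finder : Prop := ∀ (prem_l : List String), Dom_var_finder prem_l → Spec_var_finder prem_l (var_finder prem_l)

-- ===== LEMMAS AND PROOFS =====

-- reference tokenizer: maximal runs of word chars, with the current partial token as state
def pvToks : List Char → List Char → List (List Char)
  | [], cur => if cur = [] then [] else [cur]
  | c :: rest, cur =>
      if pvWord c then pvToks rest (cur ++ [c])
      else if cur = [] then pvToks rest [] else cur :: pvToks rest []

-- the shared dedup-append fold
def pvDedupFold (ts : List (List Char)) (acc : List String) : List String :=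
  ts.foldl (fun out t => if String.ofList t ∈ out then out else out ++ [String.ofList t]) acc

theorem char_le_toNat (c d : Char) (h : c ≤ d) : c.toNat ≤ d.toNat := by exact_mod_cast h

theorem word_not_space (c : Char) (h : pvWord c = true) : PySem.Chars.isspace c = false := by
  simp only [pvWord, PySem.Chars.isalnum, PySem.Chars.isalpha, PySem.Chars.isdigit,
    PySem.Chars.isupper, PySem.Chars.islower, PySem.Chars.isspace, Bool.or_eq_true,
    Bool.and_eq_true, decide_eq_true_eq, beq_iff_eq, Bool.or_eq_false_iff,
    Bool.and_eq_false_iff, decide_eq_false_iff_not] at *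
  rcases h with ((⟨h1, h2⟩ | ⟨h1, h2⟩) | ⟨h1, h2⟩) | h
  all_goals first
  | (subst h; decide)
  | (have a1 := char_le_toNat _ _ h1; have a2 := char_le_toNat _ _ h2;
     simp only [show 'A'.toNat = 65 from rfl, show 'Z'.toNat = 90 from rfl,
       show 'a'.toNat = 97 from rfl, show 'z'.toNat = 122 from rfl,
       show '0'.toNat = 48 from rfl, show '9'.toNat = 57 from rfl] at a1 a2;
     omega)

theorem space_not_word (c : Char) (h : PySem.Chars.isspace c = true) : pvWord c = false := by
  cases hw : pvWord c
  · rfl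
  · rw [word_not_space c hw] at h; exact absurd h (by simp)

-- split₀ of the masked string computes pvToks
theorem goB (s : List Char) (cur : List Char) (acc : List (List Char)) :
    PySem.Chars.split₀.go (s.map (fun c => if pvWord c then c else ' ')) cur acc
      = acc.reverse ++ pvToks s cur.reverse := by
  induction s generalizing cur acc with
  | nil =>
    cases cur with
    | nil => simp [PySem.Chars.split₀.go, pvToks]
    | cons x xs => simp [PySem.Chars.split₀.go, pvToks]
  | cons c rest ih =>
    by_cases hw : pvWord c
    · simp only [List.map_cons, if_pos hw, PySem.Chars.split₀.go, word_not_space c hw,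
        Bool.false_eq_true, if_false, ih, pvToks, List.reverse_cons]
    · simp only [List.map_cons, if_neg hw, PySem.Chars.split₀.go,
        show PySem.Chars.isspace ' ' = true from rfl, if_true, pvToks]
      cases cur with
      | nil => simp [ih]
      | cons x xs =>
        simp only [List.isEmpty_cons, ih, List.reverse_cons, if_false,
          show (xs.reverse ++ [x] : List Char) ≠ [] from by simp]
        simp

theorem splitB (s : List Char) :
    PySem.Chars.split₀ (s.map (fun c => if pvWord c then c else ' ')) = pvToks s [] := by
  rw [PySem.Chars.split₀, goB]
  rfl

-- generic list facts (not found in Mathlib by search)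
theorem take_len_takeWhile {α : Type} (p : α → Bool) (l : List α) :
    l.take (l.takeWhile p).length = l.takeWhile p := by
  induction l with
  | nil => rfl
  | cons a t ih =>
    by_cases h : p a
    · simp [h, ih]
    · simp [h]

theorem drop_len_takeWhile {α : Type} (p : α → Bool) (l : List α) :
    l.drop (l.takeWhile p).length = l.dropWhile p := by
  induction l with
  | nil => rfl
  | cons a t ih =>
    by_cases h : p a
    · simp [h, ih]
    · simp [h]

theorem pvWordEnd_spec (s : List Char) (i : Nat) :
    pvWordEnd s i = i + ((s.drop i).takeWhile pvWord).length := by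
  rw [pvWordEnd]
  split
  · rename_i h
    rw [List.drop_eq_getElem_cons h]
    split
    · rename_i hw
      rw [pvWordEnd_spec s (i + 1), List.takeWhile_cons, if_pos hw]
      simp; omega
    · rename_i hw
      rw [List.takeWhile_cons, if_neg hw]
      simp
  · rename_i h
    rw [List.drop_eq_nil_of_le (by omega)]
    simp
termination_by s.length - i
decreasing_by omega

theorem pvToks_ne (t : List Char) (cur : List Char) (h : cur ≠ []) :
    pvToks t cur = (cur ++ t.takeWhile pvWord) :: pvToks (t.dropWhile pvWord) [] := by
  induction t generalizing cur with
  | nil => simp [pvToks, h]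
  | cons c rest ih =>
    by_cases hw : pvWord c
    · rw [pvToks, if_pos hw, ih (cur ++ [c]) (by simp),
        List.takeWhile_cons, if_pos hw, List.dropWhile_cons_of_pos hw]
      simp
    · rw [pvToks, if_neg hw, if_neg h,
        List.takeWhile_cons, if_neg hw, List.dropWhile_cons_of_neg hw]
      simp [pvToks, if_neg hw]

theorem scan_toks (s : List Char) (i : Nat) (acc : List String) :
    pvScanA s i acc = pvDedupFold (pvToks (s.drop i) []) acc := by
  rw [pvScanA]
  split
  · rename_i h
    by_cases hsp : PySem.Chars.isspace s[i]
    · rw [dif_pos hsp, scan_toks s (i + 1) acc, List.drop_eq_getElem_cons h, pvToks,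
        if_neg (by simp [space_not_word _ hsp]), if_pos rfl]
    · rw [dif_neg hsp]
      by_cases hw : pvWord s[i]
      · rw [dif_pos hw, scan_toks s (pvWordEnd s i) _]
        have hT : PySem.List.slice s (some (i : Int)) (some ((pvWordEnd s i : Nat) : Int))
            = (s.drop i).takeWhile pvWord := by
          rw [PySem.List.slice_natCast, pvWordEnd_spec s i, Nat.add_sub_cancel_left,
            take_len_takeWhile]
        have hD : s.drop (pvWordEnd s i) = (s.drop i).dropWhile pvWord := by
          rw [pvWordEnd_spec s i, ← List.drop_drop, drop_len_takeWhile]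
        have hTW : List.takeWhile pvWord (List.drop i s)
            = s[i] :: List.takeWhile pvWord (List.drop (i + 1) s) := by
          rw [List.drop_eq_getElem_cons h, List.takeWhile_cons, if_pos hw]
        have hDW : List.dropWhile pvWord (List.drop i s)
            = List.dropWhile pvWord (List.drop (i + 1) s) := by
          rw [List.drop_eq_getElem_cons h, List.dropWhile_cons_of_pos hw]
        rw [hT, hD, hDW, hTW, List.drop_eq_getElem_cons h, pvToks, if_pos hw,
          List.nil_append, pvToks_ne (List.drop (i + 1) s) [s[i]] (by simp)]
        simp only [pvDedupFold, List.foldl_cons]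
        rfl
      · rw [dif_neg hw, scan_toks s (i + 1) acc, List.drop_eq_getElem_cons h, pvToks,
          if_neg hw, if_pos rfl]
  · rename_i h
    rw [List.drop_eq_nil_of_le (by omega)]
    rfl
termination_by s.length - i
decreasing_by all_goals
  first
  | omega
  | (rename_i h
     have h1 : i + 1 ≤ pvWordEnd s i := by
       rw [pvWordEnd, dif_pos h, if_pos hw]; exact pvWordEnd_ge s (i + 1)
     have h2 := pvWordEnd_le s i (Nat.le_of_lt h)
     omega)

-- ===== VERDICT (by name: the statement is the Claim_ definition above) =====
theorem var_finder_spec : Claim_equal_var_finder := by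
  intro prem_l _
  unfold Spec_var_finder var_finder var_finder_alt
  apply PySem.List.foldl_congr_mem
  intro acc prem _
  simp only [splitB]
  exact scan_toks prem.toList 0 acc
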